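-- pv_equiv track=rewrite | github.com/bmwoolf/rosalind | 11.py | rabbits
-- ===== SOURCE A (Python) =====
-- def rabbits(params):
--     # unpack params, could make it modular to do unlimited
--     n, m = params
--
--     rabbit_pairs = [0]*n
--     rabbit_pairs[0] = 1
--     for i in range(1, n):
--         if i < m:
--             if i == 1:
--                 rabbit_pairs[i] = 1
--             else:
--                 rabbit_pairs[i] = rabbit_pairs[i-1] + rabbit_pairs[i-2]
--         elif i == m:
--             rabbit_pairs[i] = rabbit_pairs[i-1] + rabbit_pairs[i-2] - 1
--         else:
--             rabbit_pairs[i] = rabbit_pairs[i-1] + rabbit_pairs[i-2] - rabbit_pairs[i-m-1]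
--     return rabbit_pairs[-1]
-- ===== SOURCE B (Python) =====
-- def rabbits(params):
--     # Age-structured model: track newborn pair counts per month plus a running total.
--     n, m = params
--     born = [1]
--     total = 1
--     for t in range(1, n):
--         new = total - born[t - 1]
--         dead = born[t - m] if t >= m else 0
--         total += new - dead
--         born.append(new)
--     return total
-- ===== Notes on version B (the rewrite author's own statement) =====
-- stated objective: simpler
-- what changed: A fills a dp array of monthly totals with a three-way branch on i vs m (Fibonacci minus death corrections); B instead simulates the age-structured model directly, keeping a list of newborn-pair counts per month and a running total, with no case analysis.
-- outside the precondition, e.g. on rabbits([3, 0]): A returns 1, B raises IndexError; on rabbits([3, -1]): A returns 2, B raises IndexError; on rabbits([1, 0]): A returns 1, B returns 1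
import Mathlib
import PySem

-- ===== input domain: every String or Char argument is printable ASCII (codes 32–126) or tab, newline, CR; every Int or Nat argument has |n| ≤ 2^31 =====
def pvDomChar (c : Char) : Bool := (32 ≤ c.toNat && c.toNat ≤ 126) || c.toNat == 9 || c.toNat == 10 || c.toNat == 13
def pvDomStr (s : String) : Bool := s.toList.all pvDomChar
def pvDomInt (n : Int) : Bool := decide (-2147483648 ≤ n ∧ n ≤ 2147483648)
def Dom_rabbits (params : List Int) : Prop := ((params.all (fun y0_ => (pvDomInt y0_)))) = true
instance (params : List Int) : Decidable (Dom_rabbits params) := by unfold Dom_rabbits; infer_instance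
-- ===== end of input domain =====

-- B replaces A's three-branch total-count recurrence by a newborns-per-month list with a
-- running total (simpler: no case analysis on i vs m). Equivalence is about the return value.

-- ===== PORT A =====
-- loop body of A's 'for i in range(1, n)'
def rabbitsStepA (m : Int) (rp : List Int) (i : Int) : List Int :=
  if i < m then
    if i = 1 then PySem.List.pySetD rp i 1
    else PySem.List.pySetD rp i (PySem.List.pyGetD rp (i-1) 0 + PySem.List.pyGetD rp (i-2) 0)
  else if i = m then
    PySem.List.pySetD rp i (PySem.List.pyGetD rp (i-1) 0 + PySem.List.pyGetD rp (i-2) 0 - 1)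
  else
    PySem.List.pySetD rp i
      (PySem.List.pyGetD rp (i-1) 0 + PySem.List.pyGetD rp (i-2) 0
        - PySem.List.pyGetD rp (i-m-1) 0)

def rabbits (params : List Int) : Int :=
  let n := params.getD 0 0
  let m := params.getD 1 0
  let rp : List Int := List.replicate n.toNat 0      -- [0]*n
  let rp := PySem.List.pySetD rp 0 1                 -- rabbit_pairs[0] = 1
  let rp := (PySem.List.pyRange 1 n 1).foldl (rabbitsStepA m) rp
  PySem.List.pyGetD rp (-1) 0                        -- rabbit_pairs[-1]

-- ===== PORT B =====
-- loop body of B's 'for t in range(1, n)'; state = (born, total)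
def rabbitsStepB (m : Int) (st : List Int × Int) (t : Int) : List Int × Int :=
  let new := st.2 - PySem.List.pyGetD st.1 (t - 1) 0
  let dead := if t ≥ m then PySem.List.pyGetD st.1 (t - m) 0 else 0
  (st.1 ++ [new], st.2 + new - dead)

def rabbits_alt (params : List Int) : Int :=
  let n := params.getD 0 0
  let m := params.getD 1 0
  let st := (PySem.List.pyRange 1 n 1).foldl (rabbitsStepB m) ([1], 1)
  st.2

-- ===== PRECONDITION & SPEC =====
-- Pre_ excludes inputs where A raises (params not of length 2, or n ≤ 0, or m ≤ -2 with n ≥ 2)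
-- and nonpositive lifespans m ≤ 0 generally: a lifespan ≤ 0 is outside the function's meaning,
-- A's returned values there (m ∈ {-1,0}, via negative-index wraparound and stale zero entries)
-- are accidents, and B's age model raises IndexError on them (except the loopless n = 1).
def Pre_rabbits (params : List Int) : Prop :=
  params.length = 2 ∧ 1 ≤ params.getD 0 0 ∧ 1 ≤ params.getD 1 0
instance (params : List Int) : Decidable (Pre_rabbits params) := by unfold Pre_rabbits; infer_instance

def pvWitness_rabbits : List Int := [7, 3]

def Spec_rabbits (params : List Int) (out : Int) : Prop := out = rabbits_alt params
instance (params : List Int) (out : Int) : Decidable (Spec_rabbits params out) := by unfold Spec_rabbits; infer_instance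

-- ===== CLAIM (what is proved, stated in full; the proofs are below) =====
def Claim_equal_rabbits : Prop := ∀ (params : List Int), Dom_rabbits params → Pre_rabbits params → Spec_rabbits params (rabbits params)

-- ===== LEMMAS AND PROOFS =====

-- Age-structured spec: nbList m t = [N t, N (t-1), …, N 0] where N j = pairs born in month j.
def nbList (m : Nat) : Nat → List Int
  | 0 => [1]
  | t+1 => ((nbList m t).tail.take (m-1)).sum :: nbList m t

def Nf (m t : Nat) : Int := (nbList m t).headI
def Tf (m t : Nat) : Int := ((nbList m t).take m).sum

theorem length_nbList (m t : Nat) : (nbList m t).length = t + 1 := by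
  induction t with
  | zero => rfl
  | succ t ih => simp [nbList, ih]

theorem nbList_succ (m t : Nat) : nbList m (t+1) = Nf m (t+1) :: nbList m t := rfl

theorem nbList_ne_nil (m t : Nat) : nbList m t ≠ [] := by
  cases t <;> simp [nbList]

theorem getD_nbList (m : Nat) {t j : Nat} (h : j ≤ t) :
    (nbList m t).getD j 0 = Nf m (t - j) := by
  induction t generalizing j with
  | zero => interval_cases j; rfl
  | succ t ih =>
    cases j with
    | zero => rfl
    | succ j =>
      have hj : j ≤ t := by omega
      simpa [nbList, Nat.succ_sub_succ] using ih hj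

theorem Nf_zero (m : Nat) : Nf m 0 = 1 := rfl

theorem Tf_zero {m : Nat} (hm : 1 ≤ m) : Tf m 0 = 1 := by
  cases m with
  | zero => omega
  | succ k => simp [Tf, nbList]

theorem Nf_succ {m : Nat} (hm : 1 ≤ m) (t : Nat) :
    Nf m (t+1) = Tf m t - Nf m t := by
  cases m with
  | zero => omega
  | succ k =>
    cases h : nbList (k+1) t with
    | nil => exact absurd h (nbList_ne_nil _ _)
    | cons a l' =>
      have hN : Nf (k+1) t = a := by simp [Nf, h]
      have hT : Tf (k+1) t = a + (l'.take k).sum := by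
        simp [Tf, h]
      simp [Nf, nbList, h, hT]

theorem Tf_succ {m : Nat} (hm : 1 ≤ m) (t : Nat) :
    Tf m (t+1) = Nf m (t+1) + Tf m t - (if m ≤ t+1 then Nf m (t+1-m) else 0) := by
  cases m with
  | zero => omega
  | succ k =>
    have hlen : (nbList (k+1) t).length = t + 1 := length_nbList _ _
    have h1 : Tf (k+1) (t+1)
        = Nf (k+1) (t+1) + ((nbList (k+1) t).take k).sum := by
      simp [Tf, nbList_succ]
    have h2 : Tf (k+1) t
        = ((nbList (k+1) t).take k).sum + ((nbList (k+1) t)[k]?.getD 0) := by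
      simp only [Tf, List.take_add_one, List.sum_append]
      cases (nbList (k+1) t)[k]? <;> simp
    by_cases hk : k ≤ t
    · have hklt : k < (nbList (k+1) t).length := by omega
      have hsome : (nbList (k+1) t)[k]?.getD 0 = (nbList (k+1) t).getD k 0 := by
        simp [List.getD]
      rw [hsome, getD_nbList _ hk] at h2
      have hcond : k + 1 ≤ t + 1 := by omega
      have harg : t + 1 - (k + 1) = t - k := by omega
      rw [h1, if_pos hcond, harg]
      omega
    · have hnone : (nbList (k+1) t)[k]? = none := by
        rw [List.getElem?_eq_none_iff]; omega
      rw [hnone] at h2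
      have hcond : ¬ (k + 1 ≤ t + 1) := by omega
      rw [h1, if_neg hcond]
      simp at h2
      omega

-- Fibonacci-with-deaths form used by A
theorem Tf_fib {m : Nat} (hm : 1 ≤ m) (t : Nat) (ht : 1 ≤ t) :
    Tf m (t+1) = Tf m t + Tf m (t-1)
      - (if m ≤ t then Nf m (t-m) else 0) - (if m ≤ t+1 then Nf m (t+1-m) else 0) := by
  obtain ⟨s, rfl⟩ : ∃ s, t = s + 1 := ⟨t - 1, by omega⟩
  have h1 := Tf_succ hm s
  have h2 := Tf_succ hm (s+1)
  have h4 := Nf_succ hm (s+1)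
  simp only [Nat.add_sub_cancel]
  by_cases hms : m ≤ s + 1
  · rw [if_pos hms] at h1 ⊢
    rw [if_pos (by omega : m ≤ s + 1 + 1)] at h2 ⊢
    omega
  · rw [if_neg hms] at h1 ⊢
    by_cases hms2 : m ≤ s + 2
    · have hme : m = s + 2 := by omega
      rw [if_pos (by omega : m ≤ s + 1 + 1)] at h2 ⊢
      have : s + 1 + 1 - m = 0 := by omega
      rw [this] at h2 ⊢
      rw [Nf_zero] at h2 ⊢
      omega
    · rw [if_neg (by omega : ¬ m ≤ s + 1 + 1)] at h2 ⊢
      omega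

theorem Nf_add_Nf_succ {m : Nat} (hm : 1 ≤ m) (t : Nat) :
    Nf m t + Nf m (t+1) = Tf m t := by
  have := Nf_succ hm t
  omega

-- small indexing helpers for the invariants
theorem getD_map_range_int (f : Nat → Int) {n j : Nat} (hj : j < n) :
    ((List.range n).map f).getD j 0 = f j := by
  simp [List.getD, hj]

theorem set_map_range (f : Nat → Int) (n i : Nat) (v : Int) (hi : i < n) :
    ((List.range n).map f).set i v
      = (List.range n).map (fun j => if j = i then v else f j) := by
  apply List.ext_getElem
  · simp
  · intro j h1 h2
    by_cases h : j = i
    · subst h; simp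
    · simp [h, Ne.symm h]

theorem getD_reverse (l : List Int) {j : Nat} (hj : j < l.length) :
    l.reverse.getD j 0 = l.getD (l.length - 1 - j) 0 := by
  rw [List.getD_eq_getElem _ _ (by simpa using hj), List.getD_eq_getElem _ _ (by omega)]
  exact List.getElem_reverse _

-- B's loop: after months 1..t, born = (nbList m t).reverse and total = Tf m t
theorem loopB {m' : Nat} (hm : 1 ≤ m') (t : Nat) :
    (PySem.List.pyRange 1 ((t:Int)+1) 1).foldl (rabbitsStepB (m' : Int)) ([1], 1)
      = ((nbList m' t).reverse, Tf m' t) := by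
  induction t with
  | zero =>
    rw [PySem.List.pyRange_one_eq_nil (by omega)]
    simp [nbList, Tf_zero hm]
  | succ t ih =>
    have hsplit : PySem.List.pyRange 1 (((t+1:Nat):Int)+1) 1
        = PySem.List.pyRange 1 ((t:Int)+1) 1 ++ [((t:Int)+1)] := by
      push_cast
      exact PySem.List.pyRange_one_succ_right (by omega)
    rw [hsplit, List.foldl_append, ih]
    have hlen : (nbList m' t).length = t + 1 := length_nbList _ _
    have hrevlen : ((nbList m' t).reverse).length = t + 1 := by simp [hlen]
    -- the newborn read: born[t] = N t
    have hread1 : PySem.List.pyGetD ((nbList m' t).reverse) ((t:Int)+1-1) 0 = Nf m' t := by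
      have e : ((t:Int)+1-1) = ((t:Nat):Int) := by ring
      rw [e, PySem.List.pyGetD_natCast, getD_reverse _ (by omega)]
      simp only [hlen, show t + 1 - 1 - t = 0 from by omega]
      simpa using getD_nbList m' (Nat.zero_le t)
    -- the death read (when m ≤ t+1): born[t+1-m] = N (t+1-m)
    have hread2 : m' ≤ t+1 →
        PySem.List.pyGetD ((nbList m' t).reverse) ((t:Int)+1-(m':Int)) 0 = Nf m' (t+1-m') := by
      intro hmt
      have e : ((t:Int)+1-(m':Int)) = (((t+1-m':Nat)):Int) := by push_cast [hmt]; ring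
      rw [e, PySem.List.pyGetD_natCast, getD_reverse _ (by omega)]
      simp only [hlen, show t + 1 - 1 - (t+1-m') = m'-1 from by omega]
      have h3 := getD_nbList m' (show m'-1 ≤ t by omega)
      rwa [show t - (m'-1) = t+1-m' from by omega] at h3
    show rabbitsStepB (m' : Int) ((nbList m' t).reverse, Tf m' t) ((t:Int)+1)
        = ((nbList m' (t+1)).reverse, Tf m' (t+1))
    unfold rabbitsStepB
    simp only [hread1]
    have hnew : Tf m' t - Nf m' t = Nf m' (t+1) := by rw [Nf_succ hm]
    by_cases hmt : m' ≤ t+1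
    · rw [if_pos (by exact_mod_cast (by omega : (m':Int) ≤ (t:Int)+1)), hread2 hmt]
      refine Prod.ext ?_ ?_
      · simp [nbList_succ, hnew]
      · simp only [hnew, Tf_succ hm t, if_pos hmt]
        ring
    · rw [if_neg (by exact_mod_cast (by omega : ¬ ((m':Int) ≤ (t:Int)+1)))]
      refine Prod.ext ?_ ?_
      · simp [nbList_succ, hnew]
      · simp only [hnew, Tf_succ hm t, if_neg hmt]
        ring

-- A's loop: after months 1..t, rp[i] = Tf m i for i ≤ t and 0 above
theorem loopA {m' n' : Nat} (hm : 1 ≤ m') (hn : 1 ≤ n') (t : Nat) (ht : t ≤ n'-1) :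
    (PySem.List.pyRange 1 ((t:Int)+1) 1).foldl (rabbitsStepA (m' : Int))
        ((List.replicate n' (0:Int)).set 0 1)
      = (List.range n').map (fun i => if i ≤ t then Tf m' i else 0) := by
  induction t with
  | zero =>
    rw [PySem.List.pyRange_one_eq_nil (by omega)]
    simp only [List.foldl_nil]
    apply List.ext_getElem
    · simp
    · intro j h1 h2
      simp only [List.getElem_set, List.getElem_replicate, List.getElem_map, List.getElem_range]
      rcases Nat.eq_zero_or_pos j with hj | hj
      · subst hj; simp [Tf_zero hm]
      · have h0 : ¬ ((0:Nat) = j) := by omega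
        have h0' : ¬ (j ≤ 0) := by omega
        simp [h0, h0']
  | succ t ih =>
    have hstep : t + 1 < n' := by omega
    have hsplit : PySem.List.pyRange 1 (((t+1:Nat):Int)+1) 1
        = PySem.List.pyRange 1 ((t:Int)+1) 1 ++ [((t:Int)+1)] := by
      push_cast
      exact PySem.List.pyRange_one_succ_right (by omega)
    rw [hsplit, List.foldl_append, ih (by omega)]
    set L := (List.range n').map (fun i => if i ≤ t then Tf m' i else 0) with hL
    have hlenL : L.length = n' := by simp [hL]
    have eI : (t:Int)+1 = ((t+1:Nat):Int) := by push_cast; ring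
    have hsetgoal : ∀ v : Int, v = Tf m' (t+1) →
        L.set (t+1) v = (List.range n').map (fun i => if i ≤ t+1 then Tf m' i else 0) := by
      intro v hv
      subst hv
      rw [hL, set_map_range _ _ _ _ hstep]
      apply List.map_congr_left
      intro j hj
      by_cases hjt : j = t+1
      · simp [hjt]
      · have hle : (j ≤ t+1) ↔ (j ≤ t) := by omega
        simp [hjt, hle]
    have hr1 : PySem.List.pyGetD L ((t:Int)+1-1) 0 = Tf m' t := by
      have e : (t:Int)+1-1 = ((t:Nat):Int) := by ring
      rw [e, PySem.List.pyGetD_natCast, hL, getD_map_range_int _ (by omega)]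
      simp
    have hr2 : 1 ≤ t → PySem.List.pyGetD L ((t:Int)+1-2) 0 = Tf m' (t-1) := by
      intro h1
      have e : (t:Int)+1-2 = (((t-1:Nat)):Int) := by rw [Nat.cast_sub h1]; ring
      rw [e, PySem.List.pyGetD_natCast, hL, getD_map_range_int _ (by omega), if_pos (by omega)]
    have hr4 : m' ≤ t → PySem.List.pyGetD L ((t:Int)+1-(m':Int)-1) 0 = Tf m' (t-m') := by
      intro hmt
      have e : (t:Int)+1-(m':Int)-1 = (((t-m':Nat)):Int) := by rw [Nat.cast_sub hmt]; ring
      rw [e, PySem.List.pyGetD_natCast, hL, getD_map_range_int _ (by omega), if_pos (by omega)]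
    rw [List.foldl_cons, List.foldl_nil]
    unfold rabbitsStepA
    by_cases hc1 : t+1 < m'
    · rw [if_pos (by exact_mod_cast hc1 : (t:Int)+1 < (m':Int))]
      by_cases hc2 : t = 0
      · subst hc2
        rw [if_pos (by norm_num)]
        rw [eI, PySem.List.pySetD_natCast]
        have hTf1 : Tf m' 1 = 1 := by
          have h1 := Tf_succ hm 0
          have h2 := Nf_succ hm 0
          rw [if_neg (by omega)] at h1
          norm_num [Nf_zero, Tf_zero hm] at h1 h2
          omega
        exact hsetgoal 1 hTf1.symm
      · rw [if_neg (by
          intro h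
          exact hc2 (by exact_mod_cast (by omega : (t:Int) = 0)))]
        rw [hr1, hr2 (by omega)]
        rw [eI, PySem.List.pySetD_natCast]
        refine hsetgoal _ ?_
        have hfib := Tf_fib hm t (by omega)
        rw [if_neg (by omega), if_neg (by omega)] at hfib
        omega
    · by_cases hc2 : t+1 = m'
      · rw [if_neg (by exact_mod_cast hc1 : ¬ ((t:Int)+1 < (m':Int))),
            if_pos (by exact_mod_cast hc2 : (t:Int)+1 = (m':Int))]
        by_cases hc3 : t = 0
        · subst hc3
          have hm1 : m' = 1 := by omega
          have hr3 : PySem.List.pyGetD L (((0:Nat):Int)+1-2) 0 = 0 := by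
            have e : (((0:Nat):Int))+1-2 = (-1 : Int) := by norm_num
            rw [e, PySem.List.pyGetD_neg_one L 0 (by
              intro hnil
              have := congrArg List.length hnil
              rw [hlenL] at this
              simp at this
              omega)]
            rw [List.getLast_eq_getElem]
            simp only [hL, List.getElem_map, List.getElem_range, List.length_map,
              List.length_range]
            rw [if_neg (by omega)]
          rw [hr1, hr3]
          rw [eI, PySem.List.pySetD_natCast]
          refine hsetgoal _ ?_
          have h1 := Tf_succ hm 0
          have h2 := Nf_succ hm 0
          rw [if_pos (by omega)] at h1
          rw [hm1] at h1 h2 ⊢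
          norm_num [Nf_zero, Tf_zero (le_refl 1)] at h1 h2 ⊢
          omega
        · rw [hr1, hr2 (by omega)]
          rw [eI, PySem.List.pySetD_natCast]
          refine hsetgoal _ ?_
          have hfib := Tf_fib hm t (by omega)
          rw [if_neg (by omega), if_pos (by omega)] at hfib
          rw [show t+1-m' = 0 from by omega, Nf_zero] at hfib
          omega
      · rw [if_neg (by exact_mod_cast hc1 : ¬ ((t:Int)+1 < (m':Int))),
            if_neg (by exact_mod_cast hc2 : ¬ ((t:Int)+1 = (m':Int)))]
        have hmt : m' ≤ t := by omega
        rw [hr1, hr2 (by omega), hr4 hmt]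
        rw [eI, PySem.List.pySetD_natCast]
        refine hsetgoal _ ?_
        have hfib := Tf_fib hm t (by omega)
        rw [if_pos (by omega), if_pos (by omega)] at hfib
        have hNN := Nf_add_Nf_succ hm (t-m')
        rw [show t-m'+1 = t+1-m' from by omega] at hNN
        omega

-- ===== VERDICT (by name: the statement is the Claim_ definition above) =====
theorem rabbits_spec : Claim_equal_rabbits := by
  intro params _hdom hpre
  obtain ⟨hlen, hn, hm⟩ := hpre
  unfold Spec_rabbits
  simp only [rabbits, rabbits_alt]
  set nI := params.getD 0 0 with hnI
  set mI := params.getD 1 0 with hmI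
  set n' := nI.toNat with hn'
  set m' := mI.toNat with hm'
  have hnn : 1 ≤ n' := by omega
  have hmm : 1 ≤ m' := by omega
  have hcm : mI = (m' : Int) := by omega
  have hrange : PySem.List.pyRange 1 nI 1 = PySem.List.pyRange 1 (((n'-1 : Nat):Int)+1) 1 := by
    have : nI = (n' : Int) := by omega
    rw [this]
    congr 1
    omega
  have hinit : PySem.List.pySetD (List.replicate n' (0:Int)) 0 1
      = (List.replicate n' (0:Int)).set 0 1 := by
    rw [show (0:Int) = ((0:Nat):Int) from rfl, PySem.List.pySetD_natCast]
  rw [hcm, hrange, hinit, loopA hmm hnn (n'-1) (le_refl _), loopB hmm (n'-1)]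
  rw [PySem.List.pyGetD_neg_one _ 0 (by simp; omega)]
  rw [List.getLast_eq_getElem]
  simp only [List.getElem_map, List.getElem_range, List.length_map, List.length_range]
  rw [if_pos (by omega)]
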